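-- pv_equiv track=rewrite | github.com/Its-Akhil/AIBusinessInsight | ragWithNER.py | generate_3_word_chunks
-- ===== SOURCE A (Python) =====
-- def generate_3_word_chunks(words, pos_tags, entities):
--     """
--     Generate contextually relevant 3-word chunks using POS tags and NER.
--     """
--     chunks = []
--     current_chunk = []
--
--     for word, pos in pos_tags:
--         if pos in {
--             "NOUN",
--             "PROPN",
--             "VERB",
--             "ADJ",
--         }:  # Select nouns, proper nouns, verbs, adjectives
--             current_chunk.append(word)
--
--         if len(current_chunk) == 3:
--             chunks.append(" ".join(current_chunk))
--             current_chunk = []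
--
--     # Handle the case where fewer than 3 words are left in the chunk
--     if len(current_chunk) > 0:
--         chunks.append(" ".join(current_chunk))
--
--     # Ensure entities are part of the output for better context
--     entity_chunks = [
--         " ".join(entity[0] for entity in entities if entity[0] in words)
--     ]
--     if entity_chunks and not chunks:
--         return entity_chunks
--
--     return chunks or entity_chunks
-- ===== SOURCE B (Python) =====
-- def generate_3_word_chunks(words, pos_tags, entities):
--     """
--     Generate contextually relevant 3-word chunks using POS tags and NER.
--     Two-pass version: filter the qualifying words, then group by stride-3 slicing.
--     """
--     filtered = [word for word, pos in pos_tags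
--                 if pos in {"NOUN", "PROPN", "VERB", "ADJ"}]
--     chunks = [" ".join(filtered[i:i + 3]) for i in range(0, len(filtered), 3)]
--
--     entity_chunks = [
--         " ".join(entity[0] for entity in entities if entity[0] in words)
--     ]
--     return chunks if chunks else entity_chunks
-- ===== Notes on version B (the rewrite author's own statement) =====
-- stated objective: simpler
-- what changed: The stateful accumulator loop (current_chunk buffer flushed at length 3, plus a trailing flush) is replaced by two stateless passes: a filter comprehension over pos_tags followed by stride-3 slicing to form the chunks; the entity fallback is kept.
import Mathlib
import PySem

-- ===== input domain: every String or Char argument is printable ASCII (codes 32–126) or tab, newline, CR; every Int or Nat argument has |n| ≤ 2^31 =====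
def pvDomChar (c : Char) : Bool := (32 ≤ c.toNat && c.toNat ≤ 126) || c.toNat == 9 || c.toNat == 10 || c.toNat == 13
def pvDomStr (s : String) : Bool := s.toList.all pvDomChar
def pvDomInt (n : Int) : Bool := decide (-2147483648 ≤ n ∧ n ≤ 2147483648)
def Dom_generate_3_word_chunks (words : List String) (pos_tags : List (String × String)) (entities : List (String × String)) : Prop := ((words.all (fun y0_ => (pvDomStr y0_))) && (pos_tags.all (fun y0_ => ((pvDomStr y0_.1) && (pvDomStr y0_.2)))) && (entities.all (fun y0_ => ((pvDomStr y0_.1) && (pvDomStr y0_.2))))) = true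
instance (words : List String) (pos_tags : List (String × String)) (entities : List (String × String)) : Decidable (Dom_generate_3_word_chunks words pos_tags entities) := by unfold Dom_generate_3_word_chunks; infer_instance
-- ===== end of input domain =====

-- B replaces A's stateful current_chunk buffer (flushed at length 3) by two stateless
-- passes: filter the qualifying words, then group by stride-3 slicing (objective: simpler).

-- ===== PORT A =====
-- literal transliteration of A: one foldl carrying (chunks, current_chunk), then the
-- trailing flush, the entity fallback, and A's return logic.
def generate_3_word_chunks (words : List String) (pos_tags : List (String × String)) (entities : List (String × String)) : List String :=
  let st := pos_tags.foldl (fun (s : List String × List String) wp =>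
      let current_chunk := if (["NOUN", "PROPN", "VERB", "ADJ"] : List String).contains wp.2
                           then s.2 ++ [wp.1] else s.2
      if current_chunk.length = 3 then (s.1 ++ [PySem.Str.join " " current_chunk], [])
      else (s.1, current_chunk)) ([], [])
  let chunks := if st.2.length > 0 then st.1 ++ [PySem.Str.join " " st.2] else st.1
  let entity_chunks := [PySem.Str.join " " ((entities.filter (fun e => words.contains e.1)).map Prod.fst)]
  if entity_chunks ≠ [] ∧ chunks = [] then entity_chunks
  else if chunks ≠ [] then chunks else entity_chunks

-- ===== PORT B =====
-- literal transliteration of B: filter comprehension, stride-3 range of slices, same fallback.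
def generate_3_word_chunks_alt (words : List String) (pos_tags : List (String × String)) (entities : List (String × String)) : List String :=
  let filtered := (pos_tags.filter (fun wp => (["NOUN", "PROPN", "VERB", "ADJ"] : List String).contains wp.2)).map Prod.fst
  let chunks := (PySem.List.pyRange 0 (filtered.length : Int) 3).map
      (fun i => PySem.Str.join " " (PySem.List.slice filtered (some i) (some (i + 3))))
  let entity_chunks := [PySem.Str.join " " ((entities.filter (fun e => words.contains e.1)).map Prod.fst)]
  if chunks ≠ [] then chunks else entity_chunks

-- ===== PRECONDITION & SPEC =====
def Spec_generate_3_word_chunks (words : List String) (pos_tags : List (String × String)) (entities : List (String × String)) (out : List String) : Prop := out = generate_3_word_chunks_alt words pos_tags entities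
instance (words : List String) (pos_tags : List (String × String)) (entities : List (String × String)) (out : List String) : Decidable (Spec_generate_3_word_chunks words pos_tags entities out) := by unfold Spec_generate_3_word_chunks; infer_instance

-- ===== CLAIM (what is proved, stated in full; the proofs are below) =====
def Claim_equal_generate_3_word_chunks : Prop := ∀ (words : List String) (pos_tags : List (String × String)) (entities : List (String × String)), Dom_generate_3_word_chunks words pos_tags entities → Spec_generate_3_word_chunks words pos_tags entities (generate_3_word_chunks words pos_tags entities)

-- ===== LEMMAS AND PROOFS =====

-- groups of 3 consecutive elements (proof-only characterisation of both chunkings)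
def chunksOf3 (l : List String) : List (List String) :=
  if _h : l = [] then [] else l.take 3 :: chunksOf3 (l.drop 3)
termination_by l.length
decreasing_by
  cases l with
  | nil => exact absurd rfl _h
  | cons a t => simp [List.length_drop]

-- A's word-level step (after the POS filter has been accounted for)
def stepW (s : List String × List String) (w : String) : List String × List String :=
  let c := s.2 ++ [w]
  if c.length = 3 then (s.1 ++ [PySem.Str.join " " c], []) else (s.1, c)

-- A's fold over pos_tags equals the word-level fold over the filtered words,
-- given the invariant that the buffer has fewer than 3 elements.
theorem foldA_eq_foldW (pos_tags : List (String × String)) :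
    ∀ (acc cur : List String), cur.length < 3 →
    pos_tags.foldl (fun (s : List String × List String) wp =>
      let current_chunk := if (["NOUN", "PROPN", "VERB", "ADJ"] : List String).contains wp.2
                           then s.2 ++ [wp.1] else s.2
      if current_chunk.length = 3 then (s.1 ++ [PySem.Str.join " " current_chunk], [])
      else (s.1, current_chunk)) (acc, cur)
    = ((pos_tags.filter (fun wp => (["NOUN", "PROPN", "VERB", "ADJ"] : List String).contains wp.2)).map Prod.fst).foldl stepW (acc, cur) := by
  induction pos_tags with
  | nil => intro acc cur _; rfl
  | cons p tl ih =>
    intro acc cur hcur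
    by_cases hq : (["NOUN", "PROPN", "VERB", "ADJ"] : List String).contains p.2
    · simp only [List.foldl_cons, List.filter_cons, hq, if_pos, List.map_cons, stepW]
      by_cases h3 : (cur ++ [p.1]).length = 3
      · simp only [h3, if_pos]
        exact ih (acc ++ [PySem.Str.join " " (cur ++ [p.1])]) [] (by simp)
      · simp only [h3, if_false]
        have : (cur ++ [p.1]).length < 3 := by
          simp only [List.length_append, List.length_cons, List.length_nil] at *
          omega
        exact ih acc (cur ++ [p.1]) this
    · simp only [List.foldl_cons, List.filter_cons, hq]
      have h3 : ¬ cur.length = 3 := by omega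
      simp only [Bool.false_eq_true, if_false, h3]
      exact ih acc cur hcur

-- running the word-level fold and flushing equals chunksOf3 of buffer ++ words
theorem foldW_chunks (ws : List String) :
    ∀ (acc cur : List String), cur.length < 3 →
    (if (ws.foldl stepW (acc, cur)).2.length > 0
     then (ws.foldl stepW (acc, cur)).1 ++ [PySem.Str.join " " (ws.foldl stepW (acc, cur)).2]
     else (ws.foldl stepW (acc, cur)).1)
    = acc ++ (chunksOf3 (cur ++ ws)).map (PySem.Str.join " ") := by
  induction ws with
  | nil =>
    intro acc cur hcur
    simp only [List.foldl_nil, List.append_nil]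
    by_cases hc : cur = []
    · subst hc; simp [chunksOf3]
    · rw [chunksOf3, dif_neg hc]
      have ht : cur.take 3 = cur := List.take_of_length_le (by omega)
      have hd : cur.drop 3 = [] := List.drop_eq_nil_of_le (by omega)
      rw [ht, hd]
      have hpos : cur.length > 0 := List.length_pos_of_ne_nil hc
      simp [chunksOf3, hpos]
  | cons w tl ih =>
    intro acc cur hcur
    simp only [List.foldl_cons, stepW]
    by_cases h3 : (cur ++ [w]).length = 3
    · simp only [h3, if_pos]
      rw [ih (acc ++ [PySem.Str.join " " (cur ++ [w])]) [] (by simp)]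
      have hsplit : cur ++ w :: tl = (cur ++ [w]) ++ tl := by simp
      simp only [List.nil_append]
      rw [hsplit]
      conv_rhs => rw [chunksOf3]
      have hne : (cur ++ [w]) ++ tl ≠ [] := by simp
      rw [dif_neg hne]
      have ht : ((cur ++ [w]) ++ tl).take 3 = cur ++ [w] := by
        rw [← h3]; exact List.take_left
      have hd : ((cur ++ [w]) ++ tl).drop 3 = tl := by
        rw [← h3]; exact List.drop_left
      rw [ht, hd]
      simp
    · simp only [h3, if_false]
      have hlt : (cur ++ [w]).length < 3 := by
        simp only [List.length_append, List.length_cons, List.length_nil] at *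
        omega
      rw [ih acc (cur ++ [w]) hlt]
      have : (cur ++ [w]) ++ tl = cur ++ w :: tl := by simp
      rw [this]

-- B's stride-3 range of slices equals chunksOf3 (generic nat-range form first)
theorem range_chunks (f : List String → String) :
    ∀ (l : List String),
    (List.range ((l.length + 2) / 3)).map (fun k => f ((l.drop (3 * k)).take 3))
    = (chunksOf3 l).map f := by
  intro l
  induction l using chunksOf3.induct with
  | case1 => simp [chunksOf3]
  | case2 l h ih =>
    rw [chunksOf3, dif_neg h, List.map_cons]
    have hcnt : (l.length + 2) / 3 = ((List.drop 3 l).length + 2) / 3 + 1 := by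
      have hlen : l.length ≠ 0 := fun h0 => h (List.eq_nil_of_length_eq_zero h0)
      simp only [List.length_drop]
      omega
    rw [hcnt, List.range_succ_eq_map, List.map_cons, List.map_map]
    refine congrArg₂ List.cons (by simp) ?_
    rw [← ih]
    apply List.map_congr_left
    intro k _
    have h1 : List.drop (3 * Nat.succ k) l = List.drop (3 * k) (List.drop 3 l) := by
      rw [List.drop_drop]; congr 1; omega
    simp [Function.comp_apply, h1]

theorem sliceB_chunks (l : List String) :
    (PySem.List.pyRange 0 (l.length : Int) 3).map
      (fun i => PySem.Str.join " " (PySem.List.slice l (some i) (some (i + 3))))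
    = (chunksOf3 l).map (PySem.Str.join " ") := by
  rw [PySem.List.pyRange_of_pos 0 (l.length : Int) (by norm_num)]
  have hcnt : (if (0 : Int) < (l.length : Int) then (((l.length : Int) - 0 + 3 - 1) / 3).toNat else 0)
      = (l.length + 2) / 3 := by
    by_cases h : (0 : Int) < (l.length : Int)
    · simp only [h, if_pos]; omega
    · simp only [h, if_false]
      omega
  rw [hcnt, List.map_map, ← range_chunks (PySem.Str.join " ") l]
  apply List.map_congr_left
  intro k _
  simp only [Function.comp_apply, zero_add]
  congr 1
  rw [PySem.List.slice_toNat l (by positivity) (by positivity)]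
  have ha : ((3 : Int) * (k : Int)).toNat = 3 * k := by omega
  have hb : ((3 : Int) * (k : Int) + 3).toNat = 3 * k + 3 := by omega
  rw [ha, hb]
  congr 1
  omega

-- ===== VERDICT (by name: the statement is the Claim_ definition above) =====
theorem generate_3_word_chunks_spec : Claim_equal_generate_3_word_chunks := by
  intro words pos_tags entities _
  unfold Spec_generate_3_word_chunks generate_3_word_chunks generate_3_word_chunks_alt
  have h1 := foldA_eq_foldW pos_tags [] [] (by simp)
  have h2 := foldW_chunks ((pos_tags.filter (fun wp => (["NOUN", "PROPN", "VERB", "ADJ"] : List String).contains wp.2)).map Prod.fst) [] [] (by simp)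
  simp only [List.nil_append] at h2
  simp only [h1, h2, sliceB_chunks]
  split_ifs with hc1 hc2 <;> simp_all
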